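-- pv_equiv track=rewrite | github.com/hjkim22/Python_Coding_Test | 프로그래머스/1/140108. 문자열 나누기/문자열 나누기.py | solution
-- ===== SOURCE A (Python) =====
-- def solution(s):
--     def split_string(s):
--         count_x = 0
--         count_other = 0
--         for char in s:
--             if char == s[0]:
--                 count_x += 1
--             else:
--                 count_other += 1
--         return count_x == count_other
--
--     result = []
--     while s:
--         for i in range(len(s)):
--             if split_string(s[:i+1]):
--                 result.append(s[:i+1])
--                 s = s[i+1:]
--                 break
--             elif i == len(s) - 1:
--                 result.append(s)
--                 s = ""
--     return len(result)
-- ===== SOURCE B (Python) =====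
-- def solution(s):
--     result = 0
--     same = diff = 0
--     x = ''
--     for ch in s:
--         if same == 0 and diff == 0:
--             x = ch
--         if ch == x:
--             same += 1
--         else:
--             diff += 1
--         if same == diff:
--             result += 1
--             same = diff = 0
--     if same or diff:
--         result += 1
--     return result
-- ===== Notes on version B (the rewrite author's own statement) =====
-- stated objective: faster
-- what changed: A repeatedly re-slices the remaining string and re-counts every candidate prefix from scratch inside a while/for nest; B makes a single left-to-right pass maintaining two running counters (same/diff) and closes a group the moment they become equal, counting one extra unfinished group at the end.
import Mathlib
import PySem

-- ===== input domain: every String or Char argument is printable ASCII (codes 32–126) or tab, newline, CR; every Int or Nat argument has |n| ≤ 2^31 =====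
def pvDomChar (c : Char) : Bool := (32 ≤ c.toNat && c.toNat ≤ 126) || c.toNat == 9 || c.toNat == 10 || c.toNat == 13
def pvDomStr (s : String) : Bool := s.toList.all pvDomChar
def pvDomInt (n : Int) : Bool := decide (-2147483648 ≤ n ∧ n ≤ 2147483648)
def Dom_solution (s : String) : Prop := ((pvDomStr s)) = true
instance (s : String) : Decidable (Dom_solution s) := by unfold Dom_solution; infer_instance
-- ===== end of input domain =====

-- B replaces A's repeated prefix re-scans (quadratic) with one linear pass keeping two running counters.

-- ===== PORT A =====
-- split_string's for-loop: accumulate (count_x, count_other) over the characters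
def cntA (fc : Char) (l : List Char) : Nat × Nat :=
  l.foldl (fun p ch => if ch = fc then (p.1 + 1, p.2) else (p.1, p.2 + 1)) (0, 0)

-- split_string(s): compares each char with s[0]; A only calls it on nonempty prefixes, where headD is s[0]
def splitStringA (l : List Char) : Bool :=
  let fc := l.headD ' '
  (cntA fc l).1 == (cntA fc l).2

-- the inner `for i in range(len(s))`: s[:i+1] = take (i+1), s[i+1:] = drop (i+1); returns (appended piece, new s)
def innerA (l : List Char) (i : Nat) : List Char × List Char :=
  if _h : i < l.length then
    if splitStringA (l.take (i + 1)) then (l.take (i + 1), l.drop (i + 1))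
    else if i = l.length - 1 then (l, [])
    else innerA l (i + 1)
  else (l, [])
termination_by l.length - i

-- termination fact the outer while-loop cites: each step strictly shrinks s
theorem innerA_snd_len (l : List Char) (hl : l ≠ []) (i : Nat) :
    (innerA l i).2.length < l.length := by
  have hlen : 0 < l.length := List.length_pos_of_ne_nil hl
  fun_induction innerA l i <;> first | assumption | (simp; omega)

-- the outer `while s:` loop, carrying the result list
def outerA (result : List (List Char)) (l : List Char) : List (List Char) :=
  if hl : l = [] then result
  else
    let pr := innerA l 0
    outerA (result ++ [pr.1]) pr.2
termination_by l.length
decreasing_by exact innerA_snd_len l hl 0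

def solution (s : String) : Int :=
  ((outerA [] s.toList).length : Int)

-- ===== PORT B =====
-- one iteration of B's for-loop over state (x, same, diff, result)
def stepB (st : Char × Nat × Nat × Nat) (ch : Char) : Char × Nat × Nat × Nat :=
  match st with
  | (x, same, diff, res) =>
    let x' := if same = 0 ∧ diff = 0 then ch else x
    let same' := if ch = x' then same + 1 else same
    let diff' := if ch = x' then diff else diff + 1
    if same' = diff' then (x', 0, 0, res + 1) else (x', same', diff', res)

-- x's initial value (Python '') is never read: the first iteration always assigns x := ch
def solution_alt (s : String) : Int :=
  let st := s.toList.foldl stepB (' ', 0, 0, 0)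
  ((if st.2.1 ≠ 0 ∨ st.2.2.1 ≠ 0 then st.2.2.2 + 1 else st.2.2.2 : Nat) : Int)

-- ===== PRECONDITION & SPEC =====
def Spec_solution (s : String) (out : Int) : Prop := out = solution_alt s
instance (s : String) (out : Int) : Decidable (Spec_solution s out) := by unfold Spec_solution; infer_instance

-- ===== CLAIM (what is proved, stated in full; the proofs are below) =====
def Claim_equal_solution : Prop := ∀ (s : String), Dom_solution s → Spec_solution s (solution s)

-- ===== LEMMAS AND PROOFS =====

-- proof-layer common abstraction: fb x s d u = number of chars of u consumed until the
-- running (same, diff) counters, started at (s, d) relative to char x, first become equal; none if never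
def fb (x : Char) (s d : Nat) : List Char → Option Nat
  | [] => none
  | ch :: rest =>
    let s' := if ch = x then s + 1 else s
    let d' := if ch = x then d else d + 1
    if s' = d' then some 1 else (fb x s' d' rest).map (· + 1)

-- the number of groups the greedy split produces
def run : List Char → Nat
  | [] => 0
  | x :: t =>
    match fb x 1 0 t with
    | some k => 1 + run (t.drop k)
    | none => 1
termination_by l => l.length
decreasing_by simp


theorem run_nil : run [] = 0 := by rw [run]
theorem run_cons (x : Char) (t : List Char) :
    run (x :: t) = (match fb x 1 0 t with | some k => 1 + run (t.drop k) | none => 1) := by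
  rw [run] <;> rfl

theorem cntA_take_succ (fc : Char) (l : List Char) (i : Nat) (h : i < l.length) :
    cntA fc (l.take (i + 1)) =
      (if l[i] = fc then ((cntA fc (l.take i)).1 + 1, (cntA fc (l.take i)).2)
       else ((cntA fc (l.take i)).1, (cntA fc (l.take i)).2 + 1)) := by
  rw [List.take_add_one, List.getElem?_eq_getElem h]
  simp only [cntA, Option.toList_some, List.foldl_append, List.foldl_cons, List.foldl_nil]

theorem headD_take (l : List Char) (hl : l ≠ []) (i : Nat) (d : Char) :
    (l.take (i + 1)).headD d = l.headD d := by
  cases l with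
  | nil => exact absurd rfl hl
  | cons a t => simp [List.take]

theorem inner_spec_aux (x : Char) (t : List Char) (fuel : Nat) :
    ∀ i, (x :: t : List Char).length - i ≤ fuel → i < (x :: t : List Char).length →
    innerA (x :: t) i =
      (match fb x (cntA x ((x :: t).take i)).1 (cntA x ((x :: t).take i)).2 ((x :: t).drop i) with
       | some k => ((x :: t).take (i + k), (x :: t).drop (i + k))
       | none => (x :: t, [])) := by
  induction fuel with
  | zero => intro i hf hi; omega
  | succ fuel ih =>
    intro i hf hi
    have hit : i ≤ t.length := by simp at hi; omega
    have hd : (x :: t).drop i = (x :: t)[i] :: (t.drop i) := by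
      simpa using (List.getElem_cons_drop hi).symm
    have hc := cntA_take_succ x (x :: t) i hi
    have hx : ((x :: t).take (i + 1)).headD ' ' = x := headD_take (x :: t) (by simp) i ' '
    rw [innerA, dif_pos hi, hd]
    by_cases hg : (x :: t)[i] = x
    · rw [if_pos hg] at hc
      have hsplit : splitStringA ((x :: t).take (i + 1)) =
          (((cntA x ((x :: t).take i)).1 + 1) == (cntA x ((x :: t).take i)).2) := by
        unfold splitStringA
        simp only [hx, hc]
      by_cases heq : (cntA x ((x :: t).take i)).1 + 1 = (cntA x ((x :: t).take i)).2
      · rw [if_pos (by rw [hsplit]; simp [heq])]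
        simp [fb, hg, heq]
      · rw [if_neg (by rw [hsplit]; simp [heq])]
        by_cases hlast : i = (x :: t : List Char).length - 1
        · rw [if_pos hlast]
          have hlt : t.length ≤ i := by simp at hlast; omega
          have hdrop : t.drop i = [] := List.drop_eq_nil_of_le hlt
          rw [hdrop]
          simp [fb, hg, heq]
        · rw [if_neg hlast]
          have hi1 : i + 1 < (x :: t : List Char).length := by simp at hi ⊢; simp at hlast; omega
          rw [ih (i + 1) (by simp at hf ⊢; omega) hi1, hc]
          simp only [Prod.fst, Prod.snd, List.drop_succ_cons]
          cases hfb : fb x ((cntA x ((x :: t).take i)).1 + 1) (cntA x ((x :: t).take i)).2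
              (t.drop i) with
          | none => simp [fb, hg, heq, hfb]
          | some k =>
              have he : i + (k + 1) = i + 1 + k := by omega
              simp [fb, hg, heq, hfb, he]
    · rw [if_neg hg] at hc
      have hsplit : splitStringA ((x :: t).take (i + 1)) =
          ((cntA x ((x :: t).take i)).1 == (cntA x ((x :: t).take i)).2 + 1) := by
        unfold splitStringA
        simp only [hx, hc]
      by_cases heq : (cntA x ((x :: t).take i)).1 = (cntA x ((x :: t).take i)).2 + 1
      · rw [if_pos (by rw [hsplit]; simp [heq])]
        simp [fb, hg, heq]
      · rw [if_neg (by rw [hsplit]; simp [heq])]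
        by_cases hlast : i = (x :: t : List Char).length - 1
        · rw [if_pos hlast]
          have hlt : t.length ≤ i := by simp at hlast; omega
          have hdrop : t.drop i = [] := List.drop_eq_nil_of_le hlt
          rw [hdrop]
          simp [fb, hg, heq]
        · rw [if_neg hlast]
          have hi1 : i + 1 < (x :: t : List Char).length := by simp at hi ⊢; simp at hlast; omega
          rw [ih (i + 1) (by simp at hf ⊢; omega) hi1, hc]
          simp only [Prod.fst, Prod.snd, List.drop_succ_cons]
          cases hfb : fb x (cntA x ((x :: t).take i)).1 ((cntA x ((x :: t).take i)).2 + 1)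
              (t.drop i) with
          | none => simp [fb, hg, heq, hfb]
          | some k =>
              have he : i + (k + 1) = i + 1 + k := by omega
              simp [fb, hg, heq, hfb, he]

theorem fb_head (x : Char) (t : List Char) :
    fb x 0 0 (x :: t) = (fb x 1 0 t).map (· + 1) := by
  simp [fb]

theorem outer_spec (n : Nat) : ∀ (l : List Char) (res : List (List Char)), l.length ≤ n →
    (outerA res l).length = res.length + run l := by
  induction n with
  | zero =>
      intro l res hn
      have : l = [] := by cases l <;> simp_all
      subst this; rw [outerA]; simp [run_nil]
  | succ n ih =>
      intro l res hn
      cases l with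
      | nil => rw [outerA]; simp [run_nil]
      | cons x t =>
          rw [outerA]
          simp only [reduceDIte, List.cons_ne_nil]
          have h0 : (0 : Nat) < (x :: t : List Char).length := by simp
          have hins := inner_spec_aux x t ((x :: t : List Char).length) 0 (by omega) h0
          simp only [List.take_zero, List.drop_zero] at hins
          have hcnt : cntA x ([] : List Char) = (0, 0) := by simp [cntA]
          rw [hcnt] at hins
          simp only [fb_head] at hins
          rw [run_cons]
          cases hfb : fb x 1 0 t with
          | none =>
              rw [hfb] at hins
              simp only [Option.map_none] at hins
              rw [hins]
              show (outerA (res ++ [x :: t]) []).length = res.length + 1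
              rw [outerA]
              simp
          | some k =>
              rw [hfb] at hins
              simp only [Option.map_some] at hins
              rw [hins]
              show (outerA (res ++ [(x :: t).take (0 + (k + 1))]) ((x :: t).drop (0 + (k + 1)))).length
                 = res.length + (1 + run (t.drop k))
              have hd2 : (x :: t).drop (0 + (k + 1)) = t.drop k := by simp
              rw [hd2, ih (t.drop k) _ (by simp at hn ⊢; omega)]
              simp
              omega

def finB (st : Char × Nat × Nat × Nat) : Nat :=
  if st.2.1 ≠ 0 ∨ st.2.2.1 ≠ 0 then st.2.2.2 + 1 else st.2.2.2

theorem foldB_spec (n : Nat) : ∀ (u : List Char), u.length ≤ n →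
    (∀ (x : Char) (res : Nat), finB (u.foldl stepB (x, 0, 0, res)) = res + run u) ∧
    (∀ (x : Char) (s d res : Nat), s ≠ d →
      finB (u.foldl stepB (x, s, d, res)) =
        res + (match fb x s d u with
               | some k => 1 + run (u.drop k)
               | none => 1)) := by
  induction n with
  | zero =>
      intro u hn
      have : u = [] := by cases u <;> simp_all
      subst this
      constructor
      · intro x res; simp [finB, run_nil]
      · intro x s d res hsd; simp [finB, fb]; omega
  | succ n ih =>
      intro u hn
      cases u with
      | nil =>
          constructor
          · intro x res; simp [finB, run_nil]
          · intro x s d res hsd; simp [finB, fb]; omega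
      | cons ch rest =>
          have hr : rest.length ≤ n := by simp at hn; omega
          constructor
          · intro x res
            have hstep : stepB (x, 0, 0, res) ch = (ch, 1, 0, res) := by
              simp [stepB]
            rw [List.foldl_cons, hstep, (ih rest hr).2 ch 1 0 res (by omega), run_cons]
          · intro x s d res hsd
            have hx' : (if s = 0 ∧ d = 0 then ch else x) = x := by
              have : ¬ (s = 0 ∧ d = 0) := by omega
              simp [this]
            by_cases hch : ch = x
            · by_cases heq : s + 1 = d
              · have hstep : stepB (x, s, d, res) ch = (x, 0, 0, res + 1) := by
                  simp [stepB, hx', hch, heq]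
                have hfb1 : fb x s d (ch :: rest) = some 1 := by
                  simp [fb, hch, heq]
                rw [List.foldl_cons, hstep, (ih rest hr).1 x (res + 1), hfb1]
                show res + 1 + run rest = res + (1 + run rest)
                omega
              · have hstep : stepB (x, s, d, res) ch = (x, s + 1, d, res) := by
                  simp [stepB, hx', hch, heq]
                have hfb1 : fb x s d (ch :: rest) = (fb x (s + 1) d rest).map (· + 1) := by
                  simp [fb, hch, heq]
                rw [List.foldl_cons, hstep, (ih rest hr).2 x (s + 1) d res heq, hfb1]
                cases hfb : fb x (s + 1) d rest <;> simp [hfb]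
            · by_cases heq : s = d + 1
              · have hstep : stepB (x, s, d, res) ch = (x, 0, 0, res + 1) := by
                  simp [stepB, hx', hch, heq]
                have hfb1 : fb x s d (ch :: rest) = some 1 := by
                  simp [fb, hch, heq]
                rw [List.foldl_cons, hstep, (ih rest hr).1 x (res + 1), hfb1]
                show res + 1 + run rest = res + (1 + run rest)
                omega
              · have hstep : stepB (x, s, d, res) ch = (x, s, d + 1, res) := by
                  simp [stepB, hx', hch, heq]
                have hfb1 : fb x s d (ch :: rest) = (fb x s (d + 1) rest).map (· + 1) := by
                  simp [fb, hch, heq]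
                rw [List.foldl_cons, hstep, (ih rest hr).2 x s (d + 1) res heq, hfb1]
                cases hfb : fb x s (d + 1) rest <;> simp [hfb]

theorem solution_spec : Claim_equal_solution := by
  intro s _
  unfold Spec_solution solution solution_alt
  have hA := outer_spec s.toList.length s.toList [] le_rfl
  have hB := (foldB_spec s.toList.length s.toList le_rfl).1 ' ' 0
  simp only [List.length_nil, Nat.zero_add] at hA
  rw [hA]
  have hfin : (if (s.toList.foldl stepB (' ', 0, 0, 0)).2.1 ≠ 0 ∨
            (s.toList.foldl stepB (' ', 0, 0, 0)).2.2.1 ≠ 0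
          then (s.toList.foldl stepB (' ', 0, 0, 0)).2.2.2 + 1
          else (s.toList.foldl stepB (' ', 0, 0, 0)).2.2.2) =
         finB (s.toList.foldl stepB (' ', 0, 0, 0)) := by
    simp [finB]
  simp only [hfin, hB, Nat.zero_add]
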